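-- pv_equiv track=rewrite | github.com/Alvaropz/Python_problems_BinarySearch | 1. Easy/turtle_of_wall_street/turtle_of_wall_street.py | turtle_of_wall_street
-- ===== SOURCE A (Python) =====
-- def turtle_of_wall_street(nums):
--     if len(nums) == 1:
--         return 0
--     total = 0
--     nums = nums[::-1]
--     i = 0
--     j = len(nums)
--     while i + 1 < j:
--         if nums[i] >= nums[i+1]:
--             biggest_n = nums[i]
--             while i < j and biggest_n >= nums[i]:
--                 total += (biggest_n - nums[i])
--                 i += 1
--         else:
--             i += 1
--     return total
-- ===== SOURCE B (Python) =====
-- def turtle_of_wall_street(nums):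
--     total = 0
--     m = None
--     for x in reversed(nums):
--         if m is None or x > m:
--             m = x
--         total += m - x
--     return total
-- ===== Notes on version B (the rewrite author's own statement) =====
-- stated objective: simpler
-- what changed: Replaces the nested while-loops that detect descending runs in the reversed array with a single flat pass keeping a running maximum and summing max-so-far minus element.
import Mathlib
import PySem

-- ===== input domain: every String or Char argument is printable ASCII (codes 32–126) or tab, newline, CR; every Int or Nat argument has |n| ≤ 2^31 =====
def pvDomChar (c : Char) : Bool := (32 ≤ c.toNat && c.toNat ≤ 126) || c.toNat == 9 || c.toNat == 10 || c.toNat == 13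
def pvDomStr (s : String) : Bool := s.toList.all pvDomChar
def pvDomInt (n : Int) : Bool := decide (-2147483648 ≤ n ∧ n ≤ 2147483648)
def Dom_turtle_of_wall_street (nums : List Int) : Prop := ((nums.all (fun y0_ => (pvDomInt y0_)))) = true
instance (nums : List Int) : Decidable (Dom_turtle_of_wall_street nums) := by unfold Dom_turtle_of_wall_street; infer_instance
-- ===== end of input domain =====

-- B replaces A's nested run-detecting while-loops by one flat running-maximum pass (objective: simpler).

-- ===== PORT A =====
-- inner while loop: 'while i < j and biggest_n >= nums[i]: total += biggest_n - nums[i]; i += 1'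
def innerA (r : List Int) (j : Nat) (b : Int) (i : Nat) (total : Int) : Nat × Int :=
  if _h : i < j ∧ b ≥ r.getD i 0 then
    innerA r j b (i + 1) (total + (b - r.getD i 0))
  else (i, total)
termination_by j - i
decreasing_by omega

theorem innerA_fst_ge (r : List Int) (j : Nat) (b : Int) :
    ∀ i total, i ≤ (innerA r j b i total).1 := by
  intro i total
  induction i, total using innerA.induct r j b with
  | case1 i total h ih =>
      rw [innerA, dif_pos h]
      omega
  | case2 i total h =>
      rw [innerA, dif_neg h]

theorem innerA_fst_gt (r : List Int) (j : Nat) (b : Int) (i : Nat) (total : Int)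
    (hij : i < j) (hb : b ≥ r.getD i 0) : i < (innerA r j b i total).1 := by
  rw [innerA, dif_pos ⟨hij, hb⟩]
  have := innerA_fst_ge r j b (i + 1) (total + (b - r.getD i 0))
  omega

-- outer while loop of A, on the reversed list r with j = len(r)
def loopA (r : List Int) (j : Nat) (i : Nat) (total : Int) : Int :=
  if _h : i + 1 < j then
    if r.getD i 0 ≥ r.getD (i + 1) 0 then
      loopA r j (innerA r j (r.getD i 0) i total).1 (innerA r j (r.getD i 0) i total).2
    else loopA r j (i + 1) total
  else total
termination_by j - i
decreasing_by
  · have h1 : i < (innerA r j (r.getD i 0) i total).1 :=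
      innerA_fst_gt r j _ i total (by omega) (le_refl _)
    omega
  · omega

def turtle_of_wall_street (nums : List Int) : Int :=
  if nums.length == 1 then 0
  else
    let r := nums.reverse
    loopA r r.length 0 0

-- ===== PORT B =====
def bstep (st : Option Int × Int) (x : Int) : Option Int × Int :=
  let m : Int := match st.1 with
    | none => x
    | some mm => if x > mm then x else mm
  (some m, st.2 + (m - x))

def turtle_of_wall_street_alt (nums : List Int) : Int :=
  (nums.reverse.foldl bstep (none, 0)).2

-- ===== PRECONDITION & SPEC =====
def Spec_turtle_of_wall_street (nums : List Int) (out : Int) : Prop := out = turtle_of_wall_street_alt nums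
instance (nums : List Int) (out : Int) : Decidable (Spec_turtle_of_wall_street nums out) := by unfold Spec_turtle_of_wall_street; infer_instance

-- ===== CLAIM (what is proved, stated in full; the proofs are below) =====
def Claim_equal_turtle_of_wall_street : Prop := ∀ (nums : List Int), Dom_turtle_of_wall_street nums → Spec_turtle_of_wall_street nums (turtle_of_wall_street nums)

-- ===== LEMMAS AND PROOFS =====

-- running-maximum fold: value added by B once the running max is m
def bfold : Int → List Int → Int
  | _, [] => 0
  | m, x :: l => (max m x - x) + bfold (max m x) l

theorem foldl_bstep_some (l : List Int) :
    ∀ (m t : Int), (l.foldl bstep (some m, t)).2 = t + bfold m l := by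
  induction l with
  | nil => intro m t; simp [bfold]
  | cons x l ih =>
      intro m t
      have hm : (if x > m then x else m) = max m x := by omega
      simp only [List.foldl_cons, bstep, hm, bfold]
      rw [ih]
      ring

theorem alt_eq (nums : List Int) :
    turtle_of_wall_street_alt nums =
      match nums.reverse with
      | [] => 0
      | x :: l => bfold x l := by
  unfold turtle_of_wall_street_alt
  cases h : nums.reverse with
  | nil => simp
  | cons x l =>
      simp only [List.foldl_cons, bstep]
      rw [foldl_bstep_some]
      omega

theorem bfold_append (b : Int) (p q : List Int) (hp : ∀ x ∈ p, x ≤ b) :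
    bfold b (p ++ q) = bfold b p + bfold b q := by
  induction p with
  | nil => simp [bfold]
  | cons x p ih =>
      have hx : max b x = b := max_eq_left (hp x (by simp))
      simp only [List.cons_append, bfold, hx]
      rw [ih (fun y hy => hp y (by simp [hy]))]
      ring

theorem inner_spec (r : List Int) (b : Int) :
    ∀ (i : Nat) (total : Int),
      innerA r r.length b i total =
        (i + ((r.drop i).takeWhile (fun x => decide (x ≤ b))).length,
         total + bfold b ((r.drop i).takeWhile (fun x => decide (x ≤ b)))) := by
  intro i total
  induction i, total using innerA.induct r r.length b with
  | case1 i total h ih =>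
      rw [innerA, dif_pos h]
      have hi : i < r.length := h.1
      have hd : r.drop i = r[i] :: r.drop (i + 1) := List.drop_eq_getElem_cons hi
      have hg : r.getD i 0 = r[i] := List.getD_eq_getElem r 0 hi
      have hx : r[i] ≤ b := by rw [hg] at h; exact h.2
      rw [ih, hg]
      have htw : (r.drop i).takeWhile (fun x => decide (x ≤ b))
          = r[i] :: (r.drop (i + 1)).takeWhile (fun x => decide (x ≤ b)) := by
        rw [hd, List.takeWhile_cons_of_pos (by simpa using hx)]
      rw [htw]
      have hmax : max b r[i] = b := max_eq_left hx
      simp only [bfold, hmax, List.length_cons, Prod.mk.injEq]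
      exact ⟨by omega, by omega⟩
  | case2 i total h =>
      rw [innerA, dif_neg h]
      rcases Nat.lt_or_ge i r.length with hi | hi
      · have hd : r.drop i = r[i] :: r.drop (i + 1) := List.drop_eq_getElem_cons hi
        have hg : r.getD i 0 = r[i] := List.getD_eq_getElem r 0 hi
        have hx : ¬ (r[i] ≤ b) := fun hle => h ⟨hi, by rw [hg]; exact hle⟩
        have htw : (r.drop i).takeWhile (fun x => decide (x ≤ b)) = [] := by
          rw [hd, List.takeWhile_cons_of_neg (by simpa using hx)]
        rw [htw]
        simp [bfold]
      · have hd : r.drop i = [] := List.drop_eq_nil_of_le hi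
        rw [hd]
        simp [bfold]

theorem loopA_spec (r : List Int) :
    ∀ (n i : Nat) (total m : Int), r.length - i ≤ n →
      (i < r.length → m ≤ r.getD i 0) →
      loopA r r.length i total = total + bfold m (r.drop i) := by
  intro n
  induction n with
  | zero =>
      intro i total m hn hm
      rw [loopA, dif_neg (by omega)]
      have hd : r.drop i = [] := List.drop_eq_nil_of_le (by omega)
      simp [hd, bfold]
  | succ n ih =>
      intro i total m hn hm
      by_cases hij : i + 1 < r.length
      · have hi : i < r.length := by omega
        have hd : r.drop i = r[i] :: r.drop (i + 1) := List.drop_eq_getElem_cons hi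
        have hg : r.getD i 0 = r[i] := List.getD_eq_getElem r 0 hi
        have hg1 : r.getD (i + 1) 0 = r[i + 1] := List.getD_eq_getElem r 0 hij
        have hmx : max m r[i] = r[i] := max_eq_right (by rw [hg] at hm; exact hm hi)
        have hbf : bfold m (r.drop i) = bfold r[i] (r.drop (i + 1)) := by
          rw [hd]; simp [bfold, hmx]
        rw [loopA, dif_pos hij]
        by_cases hge : r.getD i 0 ≥ r.getD (i + 1) 0
        · rw [if_pos hge, inner_spec]
          dsimp only
          rw [hg]
          set tw := (r.drop (i + 1)).takeWhile (fun x => decide (x ≤ r[i])) with htwdef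
          set dw := (r.drop (i + 1)).dropWhile (fun x => decide (x ≤ r[i])) with hdwdef
          have htw : (r.drop i).takeWhile (fun x => decide (x ≤ r[i])) = r[i] :: tw := by
            rw [hd, List.takeWhile_cons_of_pos (by simp), htwdef]
          rw [htw]
          have hsplit : r.drop (i + 1) = tw ++ dw := by
            rw [htwdef, hdwdef]; exact (List.takeWhile_append_dropWhile).symm
          have hdd : r.drop (i + 1 + tw.length) = dw := by
            have h2 : r.drop (i + 1 + tw.length) = (r.drop (i + 1)).drop tw.length := by
              rw [List.drop_drop]
            rw [h2, hsplit, List.drop_left]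
          have htwle : ∀ x ∈ tw, x ≤ r[i] := by
            intro x hx
            rw [htwdef] at hx
            simpa using List.mem_takeWhile_imp hx
          -- invariant for the continuation: the element where the inner loop stopped exceeds r[i]
          have hm' : i + 1 + tw.length < r.length
              → r[i] ≤ r.getD (i + 1 + tw.length) 0 := by
            intro hlt
            have hg2 := List.getD_eq_getElem r 0 hlt
            have hne := List.drop_eq_getElem_cons hlt
            rw [hdd] at hne
            have hhead := List.head?_dropWhile_not (fun x => decide (x ≤ r[i])) (r.drop (i + 1))
            rw [← hdwdef, hne] at hhead
            simp only [List.head?_cons] at hhead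
            simp only [decide_eq_false_iff_not, not_le] at hhead
            rw [hg2]
            omega
          rw [show i + (r[i] :: tw).length = i + 1 + tw.length from by simp; omega]
          have hbc : bfold r[i] (r[i] :: tw) = bfold r[i] tw := by
            simp [bfold]
          rw [hbc]
          rw [ih _ _ r[i] (by omega) hm']
          rw [hdd, hbf]
          conv_rhs => rw [hsplit]
          rw [bfold_append _ _ _ htwle]
          ring
        · rw [if_neg hge]
          have hlt : r.getD i 0 < r.getD (i + 1) 0 := by omega
          rw [ih (i + 1) total (r.getD i 0) (by omega) (fun _ => by omega)]
          rw [hbf, hg]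
      · rw [loopA, dif_neg hij]
        rcases Nat.lt_or_ge i r.length with hi | hi
        · have hd : r.drop i = r[i] :: r.drop (i + 1) := List.drop_eq_getElem_cons hi
          have hd1 : r.drop (i + 1) = [] := List.drop_eq_nil_of_le (by omega)
          have hg : r.getD i 0 = r[i] := List.getD_eq_getElem r 0 hi
          have hmx : max m r[i] = r[i] := max_eq_right (by rw [hg] at hm; exact hm hi)
          rw [hd, hd1]
          simp [bfold, hmx]
        · have hd : r.drop i = [] := List.drop_eq_nil_of_le hi
          simp [hd, bfold]

-- ===== VERDICT (by name: the statement is the Claim_ definition above) =====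
theorem turtle_of_wall_street_spec : Claim_equal_turtle_of_wall_street := by
  intro nums _
  unfold Spec_turtle_of_wall_street
  unfold turtle_of_wall_street
  rw [alt_eq]
  by_cases h1 : nums.length = 1
  · rcases List.length_eq_one_iff.mp h1 with ⟨x, rfl⟩
    simp [bfold]
  · rw [if_neg (by simpa using h1)]
    show loopA nums.reverse nums.reverse.length 0 0 = _
    cases hr : nums.reverse with
    | nil =>
        rw [loopA, dif_neg (by simp)]
    | cons x l =>
        have h0 := loopA_spec (x :: l) (x :: l).length 0 0 ((x :: l).getD 0 0)
          (by omega) (fun _ => le_refl _)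
        rw [h0]
        simp [bfold]
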